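-- pv_equiv track=rewrite | github.com/ALEXJI19991007/LJNTraining | HashTable.py | slb_karat_tree
-- ===== SOURCE A (Python) =====
-- def slb_karat_tree(array_of_tuples):
--     # These are the answers
--     nodes_with_one_parent = []
--     nodes_without_parent = []
--     # This set is to record all nodes
--     node_set = set()
--     # This dictionary is used to record the relationship between a child and its parents (may have more than 2 parents)
--     # E.g.: 1: [5, 6] --> this means 1 has two parents, which are 5 and 6
--     child_parent = {}
--     for t in array_of_tuples:
--         child = t[1]
--         parent = t[0]
--         node_set.add(child)
--         node_set.add(parent)
--         if child not in child_parent: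
--             child_parent[child] = []
--         child_parent[child].append(parent)
--     # Currently the node_set records all nodes. We need to iterate through the child_parent dictionary to remove
--     # those nodes who have parents from the node_set.
--     for c in child_parent.items():
--         node_set.remove(c[0])
--         if len(c[1]) == 1:
--             nodes_with_one_parent.append(c[0])
--     # Currently, the node_set only contains nodes without parents
--     nodes_without_parent.append(node_set)
--     return [nodes_with_one_parent, nodes_without_parent]
-- ===== SOURCE B (Python) =====
-- def slb_karat_tree(array_of_tuples):
--     # Sort-then-scan: a child has exactly one parent iff it is a "singleton run"
--     # in the sorted child list (both neighbours differ); parentless nodes are the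
--     # set difference parents - children. No dict of parent lists, no iterative removal.
--     children = [t[1] for t in array_of_tuples]
--     sc = sorted(children)
--     n = len(sc)
--     unique_children = {sc[i] for i in range(n)
--                        if (i == 0 or sc[i - 1] != sc[i])
--                        and (i == n - 1 or sc[i] != sc[i + 1])}
--     nodes_with_one_parent = [c for c in children if c in unique_children]
--     nodes_without_parent = {t[0] for t in array_of_tuples} - set(children)
--     return [nodes_with_one_parent, [nodes_without_parent]]
-- ===== Notes on version B (the rewrite author's own statement) =====
-- stated objective: alternative
-- what changed: B finds one-parent children by sorting the child list and taking singleton runs (both sorted neighbours differ), then emits them in first-appearance order with one filter, and computes parentless nodes as the set difference parents - children; no per-child parent lists, no counting dict, no iterative removal.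
import Mathlib
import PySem

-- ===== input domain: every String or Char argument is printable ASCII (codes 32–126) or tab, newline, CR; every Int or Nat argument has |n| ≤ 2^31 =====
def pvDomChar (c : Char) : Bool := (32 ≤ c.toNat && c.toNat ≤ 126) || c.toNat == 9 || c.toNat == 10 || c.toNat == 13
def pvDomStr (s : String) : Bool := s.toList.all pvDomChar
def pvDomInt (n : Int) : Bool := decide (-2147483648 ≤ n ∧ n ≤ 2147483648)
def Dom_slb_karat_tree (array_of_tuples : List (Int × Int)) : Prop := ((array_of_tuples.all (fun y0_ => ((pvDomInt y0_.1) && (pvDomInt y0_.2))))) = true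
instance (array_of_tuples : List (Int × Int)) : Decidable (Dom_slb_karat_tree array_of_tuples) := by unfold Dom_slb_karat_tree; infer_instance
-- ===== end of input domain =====

-- B replaces A's dict of per-child parent lists and iterative set removal by a sort-then-scan:
-- singleton runs of the sorted child list are the one-parent children, parentless nodes are the
-- set difference parents - children (objective: alternative; not faster).

-- ===== PORT A =====
-- node_set.add(child); node_set.add(parent)
def pvNodesStep (s : PySem.Set Int) (t : Int × Int) : PySem.Set Int :=
  PySem.Set.add (PySem.Set.add s t.2) t.1

-- the loop body's update of child_parent: 'if child not in child_parent: child_parent[child] = []'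
-- then 'child_parent[child].append(parent)', ported as d[child] = d[child] + [parent]
-- (exact: the preceding branch guarantees the key is present).
def pvStepA (d : PySem.Dict Int (List Int)) (t : Int × Int) : PySem.Dict Int (List Int) :=
  let cp := if d.contains t.2 then d else d.insert t.2 ([] : List Int)
  cp.insert t.2 (cp.getD t.2 [] ++ [t.1])

-- 'node_set.remove(c[0])' is ported as Set.discard, exact here: every dict key was added to
-- node_set in the first loop, so Python's remove never raises on any input.
def slb_karat_tree (array_of_tuples : List (Int × Int)) : List Int × List (List Int) :=
  let st := array_of_tuples.foldl
    (fun (st : PySem.Set Int × PySem.Dict Int (List Int)) t =>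
      (pvNodesStep st.1 t, pvStepA st.2 t))
    (PySem.Set.empty, PySem.Dict.empty)
  let st2 := st.2.items.foldl
    (fun (st2 : PySem.Set Int × List Int) c =>
      (PySem.Set.discard st2.1 c.1,
       if c.2.length = 1 then st2.2 ++ [c.1] else st2.2))
    (st.1, ([] : List Int))
  (st2.2, [st2.1])

-- ===== PORT B =====
-- children = [t[1] for t in array_of_tuples]
def pvChildren (array_of_tuples : List (Int × Int)) : List Int :=
  array_of_tuples.map (fun t => t.2)

-- {sc[i] for i in range(n) if (i == 0 or sc[i-1] != sc[i]) and (i == n-1 or sc[i] != sc[i+1])}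
def pvUniqueChildren (sc : List Int) : PySem.Set Int :=
  PySem.Set.ofList
    (((PySem.List.pyRange 0 (PySem.List.len sc) 1).filter (fun i =>
        ((i == 0) || !(PySem.List.pyGetD sc (i - 1) 0 == PySem.List.pyGetD sc i 0)) &&
        ((i == PySem.List.len sc - 1) || !(PySem.List.pyGetD sc i 0 == PySem.List.pyGetD sc (i + 1) 0)))).map
      (fun i => PySem.List.pyGetD sc i 0))

def slb_karat_tree_alt (array_of_tuples : List (Int × Int)) : List Int × List (List Int) :=
  ((pvChildren array_of_tuples).filter (fun c =>
      PySem.Set.contains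
        (pvUniqueChildren (PySem.List.sorted (pvChildren array_of_tuples) (fun x => x) false)) c),
   [PySem.Set.diff (PySem.Set.ofList (array_of_tuples.map (fun t => t.1)))
      (PySem.Set.ofList (pvChildren array_of_tuples))])

-- ===== PRECONDITION & SPEC =====
def Spec_slb_karat_tree (array_of_tuples : List (Int × Int)) (out : List Int × List (List Int)) : Prop := out = slb_karat_tree_alt array_of_tuples
instance (array_of_tuples : List (Int × Int)) (out : List Int × List (List Int)) : Decidable (Spec_slb_karat_tree array_of_tuples out) := by unfold Spec_slb_karat_tree; infer_instance

-- ===== CLAIM (what is proved, stated in full; the proofs are below) =====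
def Claim_equal_slb_karat_tree : Prop := ∀ (array_of_tuples : List (Int × Int)), Dom_slb_karat_tree array_of_tuples → Spec_slb_karat_tree array_of_tuples (slb_karat_tree array_of_tuples)

-- ===== LEMMAS AND PROOFS =====

-- ghost counter used only by the proofs: links A's dict of parent lists to an edge counter
def pvStepB (d : PySem.Dict Int Int) (t : Int × Int) : PySem.Dict Int Int :=
  d.insert t.2 (d.getD t.2 0 + 1)

-- A's per-child parent list, compressed to its length, is the counter entry
def pvLen (p : Int × List Int) : Int × Int := (p.1, (p.2.length : Int))

lemma pv_keys_eq (d1 : PySem.Dict Int (List Int)) (d2 : PySem.Dict Int Int)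
    (h : d1.items.map pvLen = d2.items) : d2.keys = d1.keys := by
  simp only [PySem.Dict.keys, ← h, List.map_map]; rfl

lemma pv_step (d1 : PySem.Dict Int (List Int)) (d2 : PySem.Dict Int Int) (t : Int × Int)
    (hn : d1.keys.Nodup) (h : d1.items.map pvLen = d2.items) :
    (pvStepA d1 t).keys.Nodup ∧ (pvStepA d1 t).items.map pvLen = (pvStepB d2 t).items := by
  have hkeys : d2.keys = d1.keys := pv_keys_eq d1 d2 h
  have hn2 : d2.keys.Nodup := hkeys ▸ hn
  have hcon : d2.contains t.2 = d1.contains t.2 := by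
    rw [PySem.Dict.contains_eq_decide_mem_keys, PySem.Dict.contains_eq_decide_mem_keys, hkeys]
  by_cases hc : d1.contains t.2 = true
  · constructor
    · simpa [pvStepA, hc, PySem.Dict.keys_insert_of_contains d1 _ hc] using hn
    · rw [pvStepA, pvStepB]
      simp only [hc, if_true]
      rw [PySem.Dict.items_insert_of_contains d1 _ hc,
          PySem.Dict.items_insert_of_contains d2 _ (hcon.trans hc), ← h,
          List.map_map, List.map_map]
      apply List.map_congr_left
      intro p hp
      by_cases hpk : p.1 = t.2
      · have hmem1 : (t.2, p.2) ∈ d1.items := by rwa [← hpk, Prod.mk.eta]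
        have hg1 : d1.getD t.2 [] = p.2 := PySem.Dict.getD_of_mem_items d1 hmem1 hn []
        have hmem2 : (t.2, (p.2.length : Int)) ∈ d2.items := by
          have := List.mem_map_of_mem (f := pvLen) hp
          rw [h] at this
          simpa [pvLen, hpk] using this
        have hg2 : d2.getD t.2 0 = (p.2.length : Int) :=
          PySem.Dict.getD_of_mem_items d2 hmem2 hn2 0
        simp [Function.comp, pvLen, hpk, hg1, hg2]
      · simp [Function.comp, pvLen, hpk]
  · have hc' : d1.contains t.2 = false := by simpa using hc
    have hnotk : t.2 ∉ d1.keys := by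
      intro hm
      rw [PySem.Dict.contains_eq_decide_mem_keys] at hc'
      simp [hm] at hc'
    have hc1 : (d1.insert t.2 ([] : List Int)).contains t.2 = true :=
      PySem.Dict.contains_insert_self d1 t.2 []
    constructor
    · rw [pvStepA]
      simp only [hc', Bool.false_eq_true, if_false]
      rw [PySem.Dict.keys_insert_of_contains _ _ hc1,
          PySem.Dict.keys_insert_of_not_contains d1 _ hc']
      simp only [List.nodup_append]
      refine ⟨hn, by simp, ?_⟩
      intro a ha b hb he
      rw [List.mem_singleton] at hb
      exact hnotk (hb ▸ he ▸ ha)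
    · rw [pvStepA, pvStepB]
      simp only [hc', Bool.false_eq_true, if_false]
      rw [PySem.Dict.items_insert_of_contains _ _ hc1,
          PySem.Dict.items_insert_of_not_contains d1 _ hc',
          PySem.Dict.items_insert_of_not_contains d2 _ (hcon.trans hc'),
          PySem.Dict.getD_insert_self, PySem.Dict.getD_of_not_contains d2 _ (hcon.trans hc'),
          ← h]
      rw [List.map_append]
      have hmap : ∀ p ∈ d1.items,
          (if (p.1 == t.2) = true then (t.2, ([] : List Int) ++ [t.1]) else p) = p := by
        intro p hp
        have : p.1 ≠ t.2 := fun he => hnotk (he ▸ PySem.Dict.mem_keys_of_mem_items d1 hp)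
        simp [this]
      have hid : List.map (fun p => if (p.1 == t.2) = true then (t.2, ([] : List Int) ++ [t.1]) else p) d1.items = d1.items := by
        rw [List.map_congr_left hmap]; exact List.map_id _
      rw [hid]
      simp [pvLen]

lemma pv_fold (l : List (Int × Int)) : ∀ (d1 : PySem.Dict Int (List Int)) (d2 : PySem.Dict Int Int),
    d1.keys.Nodup → d1.items.map pvLen = d2.items →
    (l.foldl pvStepA d1).keys.Nodup ∧ (l.foldl pvStepA d1).items.map pvLen = (l.foldl pvStepB d2).items := by
  induction l with
  | nil => intro d1 d2 hn h; exact ⟨hn, h⟩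
  | cons t l ih =>
      intro d1 d2 hn h
      have := pv_step d1 d2 t hn h
      exact ih _ _ this.1 this.2

-- the ghost counter fold IS Counter(children)
lemma pv_cnt_eq (arr : List (Int × Int)) :
    arr.foldl pvStepB PySem.Dict.empty = PySem.Dict.counter (pvChildren arr) := by
  rw [← PySem.Dict.foldl_insert_getD_add_one_eq_counter, pvChildren, List.foldl_map]
  rfl

lemma pv_itemsA (arr : List (Int × Int)) :
    (arr.foldl pvStepA PySem.Dict.empty).items.map pvLen
      = (PySem.Set.ofList (pvChildren arr)).map
          (fun k => (k, ((pvChildren arr).count k : Int))) := by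
  rw [(pv_fold arr PySem.Dict.empty PySem.Dict.empty (by simp) rfl).2, pv_cnt_eq,
      PySem.Dict.items_counter]

lemma pv_foldl_discard (items : List (Int × List Int)) : ∀ (s : PySem.Set Int),
    items.foldl (fun s c => PySem.Set.discard s c.1) s
      = s.filter (fun n => !(items.map (·.1)).contains n) := by
  induction items with
  | nil => intro s; simp
  | cons c items ih =>
      intro s
      simp only [List.foldl_cons, ih, List.map_cons]
      show (s.filter (fun y => !(y == c.1))).filter _ = _
      rw [List.filter_filter]
      apply List.filter_congr
      intro n _
      simp [Bool.and_comm]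

-- the node_set loop is a fold of Set.add over the interleaved child/parent stream
lemma pv_nodes_eq_flatMap (arr : List (Int × Int)) : ∀ (s : PySem.Set Int),
    arr.foldl pvNodesStep s = (arr.flatMap (fun t => [t.2, t.1])).foldl PySem.Set.add s := by
  induction arr with
  | nil => intro s; rfl
  | cons t arr ih =>
      intro s
      rw [List.flatMap_cons, List.foldl_append, List.foldl_cons, ih]
      rfl

-- filtering commutes with the Set.add fold (hence with Set.ofList)
lemma pv_filter_foldl_add (p : Int → Bool) : ∀ (L : List Int) (s : PySem.Set Int),
    (L.foldl PySem.Set.add s).filter p = (L.filter p).foldl PySem.Set.add (s.filter p) := by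
  intro L
  induction L with
  | nil => intro s; simp
  | cons x L ih =>
      intro s
      by_cases hm : x ∈ s
      · have h1 : PySem.Set.add s x = s := by
          show (if s.contains x then s else s ++ [x]) = s
          simp [hm]
        by_cases hx : p x = true
        · have hm2 : x ∈ s.filter p := List.mem_filter.mpr ⟨hm, hx⟩
          have h2 : PySem.Set.add (s.filter p) x = s.filter p := by
            show (if (s.filter p).contains x then s.filter p else _) = _
            simp [hm2]
          simp only [List.foldl_cons, h1, List.filter_cons, hx, if_true, h2]
          exact ih s
        · simp only [List.foldl_cons, h1, List.filter_cons, hx]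
          simpa using ih s
      · have h1 : PySem.Set.add s x = s ++ [x] := by
          show (if s.contains x then s else s ++ [x]) = s ++ [x]
          simp [hm]
        by_cases hx : p x = true
        · have hm2 : x ∉ s.filter p := fun h => hm (List.mem_filter.mp h).1
          have h2 : PySem.Set.add (s.filter p) x = s.filter p ++ [x] := by
            show (if (s.filter p).contains x then _ else _) = _
            simp [hm2]
          have h3 : (s ++ [x]).filter p = s.filter p ++ [x] := by
            rw [List.filter_append]; simp [hx]
          simp only [List.foldl_cons, h1, List.filter_cons, hx, if_true, h2]
          rw [ih (s ++ [x]), h3]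
        · have h3 : (s ++ [x]).filter p = s.filter p := by
            rw [List.filter_append]; simp [hx]
          simp only [List.foldl_cons, h1, List.filter_cons, hx]
          simpa [h3] using ih (s ++ [x])

lemma pv_ofList_filter (p : Int → Bool) (L : List Int) :
    (PySem.Set.ofList L).filter p = PySem.Set.ofList (L.filter p) := by
  have := pv_filter_foldl_add p L []
  simpa using this

-- dropping the child slots of the interleaved stream leaves the parents
lemma pv_flatMap_filter (q : Int → Bool) (children : List Int)
    (hq : ∀ c ∈ children, q c = false) :
    ∀ arr : List (Int × Int), (∀ t ∈ arr, t.2 ∈ children) →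
    (arr.flatMap (fun t => [t.2, t.1])).filter q = (arr.map (fun t => t.1)).filter q := by
  intro arr
  induction arr with
  | nil => intro _; rfl
  | cons t arr ih =>
      intro h
      have h2 : q t.2 = false := hq t.2 (h t (by simp))
      have ih' := ih (fun t' ht' => h t' (by simp [ht']))
      rw [List.flatMap_cons, List.filter_append, List.map_cons]
      cases hx : q t.1 <;> simp [h2, hx, ih']

-- monotone access into a (≤)-sorted list
lemma pv_mono (sc : List Int) (hp : sc.Pairwise (fun a b => a ≤ b))
    (p q : Nat) (hpq : p ≤ q) (hq : q < sc.length) :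
    sc[p]'(Nat.lt_of_le_of_lt hpq hq) ≤ sc[q] := by
  rcases Nat.eq_or_lt_of_le hpq with rfl | h
  · exact le_refl _
  · exact List.pairwise_iff_getElem.mp hp p q _ hq h

lemma pv_two_le_count (sc : List Int) (c : Int) (a b : Nat) (hab : a < b)
    (hb : b < sc.length) (ha' : sc[a]'(Nat.lt_trans hab hb) = c) (hb' : sc[b] = c) :
    2 ≤ sc.count c := by
  rw [← List.duplicate_iff_two_le_count]
  exact List.duplicate_iff_exists_distinct_get.mpr
    ⟨⟨a, Nat.lt_trans hab hb⟩, ⟨b, hb⟩, hab, by simp [List.get_eq_getElem, ha'], by simp [List.get_eq_getElem, hb']⟩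

-- a singleton run in a sorted list is exactly an element of count 1
lemma pv_getD (l : List Int) (n : Nat) (h : n < l.length) : l.getD n 0 = l[n] :=
  List.getD_eq_getElem l 0 h

lemma pv_count_one_iff (sc : List Int) (hp : sc.Pairwise (fun a b => a ≤ b)) (c : Int) :
    sc.count c = 1 ↔
      ∃ j : Nat, j < sc.length ∧ sc.getD j 0 = c ∧
        (j = 0 ∨ sc.getD (j - 1) 0 ≠ c) ∧
        (j = sc.length - 1 ∨ sc.getD (j + 1) 0 ≠ c) := by
  constructor
  · intro hc
    have hmem : c ∈ sc := by
      have : 0 < sc.count c := by omega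
      exact List.count_pos_iff.mp this
    obtain ⟨j, hj, hv⟩ := List.getElem_of_mem hmem
    refine ⟨j, hj, by rw [pv_getD _ _ hj]; exact hv, ?_, ?_⟩
    · by_cases h0 : j = 0
      · exact Or.inl h0
      · refine Or.inr (fun he => ?_)
        rw [pv_getD _ _ (by omega : j - 1 < sc.length)] at he
        have := pv_two_le_count sc c (j - 1) j (by omega) hj he hv
        omega
    · by_cases hl : j = sc.length - 1
      · exact Or.inl hl
      · have hj1 : j + 1 < sc.length := by omega
        refine Or.inr (fun he => ?_)
        rw [pv_getD _ _ hj1] at he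
        have := pv_two_le_count sc c j (j + 1) (by omega) hj1 hv he
        omega
  · rintro ⟨j, hj, hv, hleft, hright⟩
    rw [pv_getD _ _ hj] at hv
    have h1 : 1 ≤ sc.count c := by
      have hm : c ∈ sc := hv ▸ List.getElem_mem hj
      have := List.count_pos_iff.mpr hm
      omega
    by_cases h2 : 2 ≤ sc.count c
    · exfalso
      obtain ⟨n, m, hnm, hn', hm'⟩ :=
        List.duplicate_iff_exists_distinct_get.mp (List.duplicate_iff_two_le_count.mpr h2)
      have hmlen : (m : Nat) < sc.length := m.2
      have hcn : sc[(n : Nat)]'(n.2) = c := by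
        simpa [List.get_eq_getElem] using hn'.symm
      have hcm : sc[(m : Nat)]'(hmlen) = c := by
        simpa [List.get_eq_getElem] using hm'.symm
      -- the pair (m-1, m) is adjacent and both slots hold c
      have hkm : sc[(m : Nat) - 1]'(by omega) = c := by
        have hle1 : (n : Nat) ≤ (m : Nat) - 1 := by
          have : (n : Nat) < (m : Nat) := hnm
          omega
        have ha := pv_mono sc hp n ((m : Nat) - 1) hle1 (by omega)
        have hb := pv_mono sc hp ((m : Nat) - 1) m (by omega) hmlen
        rw [hcn] at ha
        rw [hcm] at hb
        omega
      by_cases hcmp : j ≤ (m : Nat) - 1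
      · -- the right neighbour of j is forced to c
        have hmpos : 0 < (m : Nat) := by
          have : (n : Nat) < (m : Nat) := hnm
          omega
        have hj1 : j + 1 ≤ (m : Nat) := by omega
        have hj1lt : j + 1 < sc.length := by omega
        rcases hright with h | h
        · omega
        · have ha := pv_mono sc hp j (j + 1) (by omega) hj1lt
          have hb := pv_mono sc hp (j + 1) m hj1 hmlen
          rw [hv] at ha
          rw [hcm] at hb
          apply h
          rw [pv_getD _ _ hj1lt]
          omega
      · -- the left neighbour of j is forced to c
        have hmj : (m : Nat) - 1 ≤ j - 1 := by omega
        have hj0 : j ≠ 0 := by omega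
        rcases hleft with h | h
        · exact hj0 h
        · have ha := pv_mono sc hp ((m : Nat) - 1) (j - 1) hmj (by omega)
          have hb := pv_mono sc hp (j - 1) j (by omega) hj
          rw [hkm] at ha
          rw [hv] at hb
          apply h
          rw [pv_getD _ _ (by omega : j - 1 < sc.length)]
          omega
    · omega

-- membership in B's comprehension set, over any (≤)-sorted list
lemma pv_mem_uniq_iff (sc : List Int) (hp : sc.Pairwise (fun a b => a ≤ b)) (c : Int) :
    c ∈ pvUniqueChildren sc ↔ sc.count c = 1 := by
  rw [pvUniqueChildren, PySem.Set.mem_ofList, List.mem_map, pv_count_one_iff sc hp c]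
  constructor
  · rintro ⟨i, hi, hval⟩
    rw [List.mem_filter, PySem.List.mem_pyRange_one] at hi
    obtain ⟨⟨hi0, hilt⟩, hcond⟩ := hi
    have hlen : (PySem.List.len sc) = (sc.length : Int) := by simp
    rw [hlen] at hilt
    have hij : i = ((i.toNat : Nat) : Int) := by omega
    set j := i.toNat with hjdef
    have hjlt : j < sc.length := by omega
    have hvj : sc.getD j 0 = c := by
      rw [← hval, hij, PySem.List.pyGetD_natCast]
    rw [Bool.and_eq_true, Bool.or_eq_true, Bool.or_eq_true] at hcond
    obtain ⟨hcl, hcr⟩ := hcond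
    refine ⟨j, hjlt, hvj, ?_, ?_⟩
    · rcases hcl with h | h
      · left
        have : i = 0 := by simpa using h
        omega
      · by_cases h0 : j = 0
        · exact Or.inl h0
        · right
          intro he
          rw [Bool.not_eq_true', beq_eq_false_iff_ne] at h
          apply h
          have him1 : i - 1 = ((j - 1 : Nat) : Int) := by omega
          rw [him1, hij, PySem.List.pyGetD_natCast, PySem.List.pyGetD_natCast, he, hvj]
    · rcases hcr with h | h
      · left
        rw [hlen] at h
        have : i = (sc.length : Int) - 1 := by simpa using h
        omega
      · by_cases hl : j = sc.length - 1
        · exact Or.inl hl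
        · right
          intro he
          rw [Bool.not_eq_true', beq_eq_false_iff_ne] at h
          apply h
          have hip1 : i + 1 = ((j + 1 : Nat) : Int) := by omega
          rw [hip1, hij, PySem.List.pyGetD_natCast, PySem.List.pyGetD_natCast, he, hvj]
  · rintro ⟨j, hj, hv, hleft, hright⟩
    refine ⟨(j : Int), ?_, ?_⟩
    · rw [List.mem_filter, PySem.List.mem_pyRange_one]
      have hlen : (PySem.List.len sc) = (sc.length : Int) := by simp
      refine ⟨⟨by omega, by rw [hlen]; exact_mod_cast hj⟩, ?_⟩
      rw [Bool.and_eq_true, Bool.or_eq_true, Bool.or_eq_true]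
      constructor
      · by_cases h0 : j = 0
        · left; simp [h0]
        · right
          have hne : sc.getD (j - 1) 0 ≠ c := by
            rcases hleft with h | h
            · exact absurd h h0
            · exact h
          have him1 : (j : Int) - 1 = ((j - 1 : Nat) : Int) := by omega
          rw [Bool.not_eq_true', beq_eq_false_iff_ne, him1,
              PySem.List.pyGetD_natCast, PySem.List.pyGetD_natCast, hv]
          exact hne
      · by_cases hl : j = sc.length - 1
        · left
          have hcast : (j : Int) = (sc.length : Int) - 1 := by omega
          rw [hlen, hcast]
          simp
        · right
          have hne : sc.getD (j + 1) 0 ≠ c := by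
            rcases hright with h | h
            · exact absurd h hl
            · exact h
          have hip1 : (j : Int) + 1 = ((j + 1 : Nat) : Int) := by omega
          rw [Bool.not_eq_true', beq_eq_false_iff_ne, hip1,
              PySem.List.pyGetD_natCast, PySem.List.pyGetD_natCast, hv]
          exact fun he => hne he.symm
    · rw [PySem.List.pyGetD_natCast]
      exact hv

-- A's one-parent list equals the count-1 filter over the deduped children
lemma pv_onesA (arr : List (Int × Int)) :
    ((arr.foldl pvStepA PySem.Dict.empty).items.filter (fun c => decide (c.2.length = 1))).map (fun c => c.1)
      = (PySem.Set.ofList (pvChildren arr)).filter (fun k => (pvChildren arr).count k == 1) := by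
  have h1 : ((arr.foldl pvStepA PySem.Dict.empty).items.filter (fun c => decide (c.2.length = 1))).map (fun c => c.1)
      = ((((arr.foldl pvStepA PySem.Dict.empty).items.map pvLen).filter (fun p => p.2 == 1)).map (fun p => p.1)) := by
    rw [List.filter_map, List.map_map]
    apply congrArg
    apply List.filter_congr
    intro c _
    show decide (c.2.length = 1) = ((fun p : Int × Int => p.2 == 1) (pvLen c))
    by_cases hl : c.2.length = 1
    · simp [pvLen, hl]
    · simp only [pvLen, hl, decide_false]
      symm
      rw [beq_eq_false_iff_ne]
      exact fun h => hl (by exact_mod_cast h)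
  rw [h1, pv_itemsA, List.filter_map, List.map_map]
  have hf : ((fun p : Int × Int => p.1) ∘ (fun k : Int => (k, ((pvChildren arr).count k : Int)))) = id := rfl
  have hc : ((fun p : Int × Int => p.2 == 1) ∘ (fun k : Int => (k, ((pvChildren arr).count k : Int))))
      = fun k => (((pvChildren arr).count k : Int) == 1) := rfl
  rw [hf, hc, List.map_id]
  apply List.filter_congr
  intro k _
  show (((pvChildren arr).count k : Int) == 1) = ((pvChildren arr).count k == 1)
  by_cases hcnt : (pvChildren arr).count k = 1
  · simp [hcnt]
  · rw [beq_eq_false_iff_ne.mpr hcnt, beq_eq_false_iff_ne.mpr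
      (fun h : ((pvChildren arr).count k : Int) = (1 : Int) => hcnt (by exact_mod_cast h))]

-- the count-1 filter passes unchanged through dedup
lemma pv_dedup_count_one (l : List Int) :
    (PySem.Set.ofList l).filter (fun k => l.count k == 1) = l.filter (fun k => l.count k == 1) := by
  rw [pv_ofList_filter]
  apply PySem.Set.ofList_eq_self_of_nodup
  rw [List.nodup_iff_count_le_one]
  intro a
  by_cases ha : l.count a = 1
  · have hle : (l.filter (fun k => l.count k == 1)).count a ≤ l.count a :=
      (List.filter_sublist).count_le a
    omega
  · have : a ∉ l.filter (fun k => l.count k == 1) := by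
      intro hm
      exact ha (by simpa using (List.mem_filter.mp hm).2)
    rw [List.count_eq_zero.mpr this]
    omega

-- A's dict keys are the deduped children
lemma pv_keysA (arr : List (Int × Int)) :
    (arr.foldl pvStepA PySem.Dict.empty).items.map (fun p => p.1)
      = PySem.Set.ofList (pvChildren arr) := by
  have h := congrArg (List.map (fun p : Int × Int => p.1)) (pv_itemsA arr)
  rw [List.map_map, List.map_map] at h
  have h1 : ((fun p : Int × Int => p.1) ∘ pvLen) = (fun p : Int × List Int => p.1) := rfl
  have h2 : ((fun p : Int × Int => p.1) ∘ (fun k : Int => (k, ((pvChildren arr).count k : Int)))) = id := rfl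
  rw [h1, h2, List.map_id] at h
  exact h

-- raw-list contains agrees with contains on the deduped list
lemma pv_contains_ofList (L : List Int) (x : Int) :
    List.contains (PySem.Set.ofList L) x = List.contains L x := by
  by_cases h : x ∈ L
  · have h1 : x ∈ PySem.Set.ofList L := by rw [PySem.Set.mem_ofList]; exact h
    simp [h, h1]
  · have h1 : x ∉ PySem.Set.ofList L := by rw [PySem.Set.mem_ofList]; exact h
    simp [h, h1]

-- ===== VERDICT (by name: the statement is the Claim_ definition above) =====
theorem slb_karat_tree_spec : Claim_equal_slb_karat_tree := by
  intro ats _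
  show slb_karat_tree ats = slb_karat_tree_alt ats
  rw [slb_karat_tree, slb_karat_tree_alt]
  rw [PySem.List.foldl_prod_mk pvNodesStep pvStepA ats PySem.Set.empty PySem.Dict.empty]
  set cp := ats.foldl pvStepA PySem.Dict.empty with hcp
  set ns := ats.foldl pvNodesStep PySem.Set.empty with hns
  set sc := PySem.List.sorted (pvChildren ats) (fun x => x) false with hsc
  rw [PySem.List.foldl_prod_mk (fun s (c : Int × List Int) => PySem.Set.discard s c.1)
        (fun acc (c : Int × List Int) => if c.2.length = 1 then acc ++ [c.1] else acc)
        cp.items ns ([] : List Int)]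
  have hp : sc.Pairwise (fun a b => a ≤ b) := PySem.List.sorted_pairwise (pvChildren ats) (fun x => x)
  have hcount : ∀ c : Int, sc.count c = (pvChildren ats).count c := fun c =>
    (PySem.List.sorted_perm (pvChildren ats) (fun x => x) false).count_eq c
  refine Prod.ext ?_ ?_
  · -- nodes with one parent
    dsimp only
    rw [PySem.List.foldl_append_ite (fun c : Int × List Int => c.2.length = 1)
          (fun c => c.1) cp.items ([] : List Int)]
    rw [List.nil_append, hcp, pv_onesA, pv_dedup_count_one]
    apply List.filter_congr
    intro c _
    by_cases h : (pvChildren ats).count c = 1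
    · have hm : c ∈ pvUniqueChildren sc :=
        (pv_mem_uniq_iff sc hp c).mpr (by rw [hcount]; exact h)
      have hct : PySem.Set.contains (pvUniqueChildren sc) c = true :=
        (PySem.Set.contains_iff (pvUniqueChildren sc) c).mpr hm
      rw [hct]
      exact beq_iff_eq.mpr h ▸ rfl
    · have hm : c ∉ pvUniqueChildren sc := fun hm =>
        h (by rw [← hcount]; exact (pv_mem_uniq_iff sc hp c).mp hm)
      have hct : PySem.Set.contains (pvUniqueChildren sc) c = false := by
        rw [← Bool.not_eq_true]
        exact fun ht => hm ((PySem.Set.contains_iff (pvUniqueChildren sc) c).mp ht)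
      rw [beq_eq_false_iff_ne.mpr h, hct]
  · -- nodes without parent
    dsimp only
    rw [pv_foldl_discard cp.items ns]
    refine congrArg (fun l => [l]) ?_
    have hqe : (fun n => !(cp.items.map (fun p => p.1)).contains n)
        = (fun n => !(pvChildren ats).contains n) := by
      funext n
      rw [hcp, pv_keysA, pv_contains_ofList]
    rw [hqe, hns, pv_nodes_eq_flatMap, pv_filter_foldl_add]
    have hnil : List.filter (fun n => !(pvChildren ats).contains n) (PySem.Set.empty : PySem.Set Int) = [] := rfl
    rw [hnil]
    have hflt : (ats.flatMap (fun t => [t.2, t.1])).filter (fun n => !(pvChildren ats).contains n)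
        = (ats.map (fun t => t.1)).filter (fun n => !(pvChildren ats).contains n) := by
      refine pv_flatMap_filter _ (pvChildren ats) ?_ ats ?_
      · intro c hc
        simp [hc]
      · intro t ht
        exact List.mem_map_of_mem ht
    rw [hflt]
    show PySem.Set.ofList ((ats.map (fun t => t.1)).filter (fun n => !(pvChildren ats).contains n)) = _
    rw [← pv_ofList_filter]
    show _ = (PySem.Set.ofList (ats.map (fun t => t.1))).filter
        (fun x => !(List.contains (PySem.Set.ofList (pvChildren ats)) x))
    apply List.filter_congr
    intro n _
    rw [pv_contains_ofList]
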